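-- pv_equiv track=rewrite | github.com/music-assistant/support | .github/scripts/triage_bot.py | parse_issue_sections
-- ===== SOURCE A (Python) =====
-- from typing import List, Set, Dict, Optional
--
-- def parse_issue_sections(issue_body: str) -> Dict[str, str]:
--     """Parse issue body into sections based on headers."""
--     if not issue_body:
--         return {}
--
--     sections = {}
--     current_section = None
--     current_content = []
--
--     for line in issue_body.split('\n'):
--         # Check for section headers (### Header)
--         if line.startswith('###'):
--             if current_section:
--                 sections[current_section] = '\n'.join(current_content).strip()
--             current_section = line.replace('#', '').strip()
--             current_content = []
--         elif current_section:
--             current_content.append(line)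
--
--     # Add last section
--     if current_section:
--         sections[current_section] = '\n'.join(current_content).strip()
--
--     return sections
-- ===== SOURCE B (Python) =====
-- def parse_issue_sections(issue_body: str):
--     """Parse issue body into sections: split into (header, content) segments, then build the dict."""
--     def segments(lines):
--         # drop everything before the first header
--         while lines and not lines[0].startswith('###'):
--             lines = lines[1:]
--         if not lines:
--             return []
--         header, rest = lines[0], lines[1:]
--         k = 0
--         while k < len(rest) and not rest[k].startswith('###'):
--             k += 1
--         return [(header, rest[:k])] + segments(rest[k:])
--
--     sections = {}
--     for header, content in segments(issue_body.split('\n')):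
--         name = header.replace('#', '').strip()
--         if name:
--             sections[name] = '\n'.join(content).strip()
--     return sections
-- ===== Notes on version B (the rewrite author's own statement) =====
-- stated objective: alternative
-- what changed: Replaces A's single stateful scan with mutable current_section/current_content accumulators and end-of-loop flush by a two-phase decomposition: first partition the lines into (header, content) segments (dropping any preamble before the first header), then build the dict by mapping name extraction and the truthiness filter over the segments.
import Mathlib
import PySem

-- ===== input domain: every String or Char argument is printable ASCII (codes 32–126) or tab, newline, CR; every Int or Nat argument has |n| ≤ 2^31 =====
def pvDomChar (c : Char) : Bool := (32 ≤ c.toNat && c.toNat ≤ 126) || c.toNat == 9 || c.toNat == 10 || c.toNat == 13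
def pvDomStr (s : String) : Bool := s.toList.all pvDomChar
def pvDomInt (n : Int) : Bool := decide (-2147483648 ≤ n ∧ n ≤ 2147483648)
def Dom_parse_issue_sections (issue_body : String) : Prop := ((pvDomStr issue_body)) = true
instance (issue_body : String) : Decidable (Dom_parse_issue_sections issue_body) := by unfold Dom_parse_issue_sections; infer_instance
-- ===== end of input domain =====

-- B replaces A's stateful single pass by a partition-into-segments phase followed by a dict-building pass (alternative decomposition, same cost).

-- shared small helpers (the same elementary computations both Pythons perform)
def pvLines (s : String) : List String := (PySem.Str.split? s "\n").getD []  -- s.split('\n'); sep "\n" ≠ "" so split? is always some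
def pvIsHeader (line : String) : Bool := PySem.Str.startswith line "###"
def pvName (line : String) : String := PySem.Str.strip (PySem.Str.replace line "#" "")
def pvJoinStrip (content : List String) : String := PySem.Str.strip (PySem.Str.join "\n" content)

-- ===== PORT A =====
-- loop body of A's for-loop: state = (sections, current_section ("" models falsy None), current_content)
def pvStepA (st : PySem.Dict String String × String × List String) (line : String) :
    PySem.Dict String String × String × List String :=
  if pvIsHeader line then
    ((if st.2.1 ≠ "" then st.1.insert st.2.1 (pvJoinStrip st.2.2) else st.1), pvName line, [])
  else if st.2.1 ≠ "" then (st.1, st.2.1, st.2.2 ++ [line])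
  else st

def parse_issue_sections (issue_body : String) : List (String × String) :=
  if issue_body = "" then []
  else
    let st := (pvLines issue_body).foldl pvStepA (PySem.Dict.empty, "", [])
    (if st.2.1 ≠ "" then st.1.insert st.2.1 (pvJoinStrip st.2.2) else st.1).items

-- ===== PORT B =====
-- Source B's `segments`: drop the preamble, split off (header, content-until-next-header), recurse
def pvSegments (lines : List String) : List (String × List String) :=
  match h : lines.dropWhile (fun l => !pvIsHeader l) with
  | [] => []
  | header :: rest =>
      (header, rest.takeWhile (fun l => !pvIsHeader l)) ::
        pvSegments (rest.dropWhile (fun l => !pvIsHeader l))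
termination_by lines.length
decreasing_by
  have h1 : (lines.dropWhile (fun l => !pvIsHeader l)).length ≤ lines.length :=
    (List.dropWhile_sublist _).length_le
  have h2 : (rest.dropWhile (fun l => !pvIsHeader l)).length ≤ rest.length :=
    (List.dropWhile_sublist _).length_le
  rw [h] at h1
  simp at h1 ⊢
  omega

-- Source B's dict-building loop body
def pvStepB (d : PySem.Dict String String) (seg : String × List String) : PySem.Dict String String :=
  let name := pvName seg.1
  if name ≠ "" then d.insert name (pvJoinStrip seg.2) else d

def parse_issue_sections_alt (issue_body : String) : List (String × String) :=
  ((pvSegments (pvLines issue_body)).foldl pvStepB PySem.Dict.empty).items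

-- ===== PRECONDITION & SPEC =====
def Spec_parse_issue_sections (issue_body : String) (out : List (String × String)) : Prop := out = parse_issue_sections_alt issue_body
instance (issue_body : String) (out : List (String × String)) : Decidable (Spec_parse_issue_sections issue_body out) := by unfold Spec_parse_issue_sections; infer_instance

-- ===== CLAIM (what is proved, stated in full; the proofs are below) =====
def Claim_equal_parse_issue_sections : Prop := ∀ (issue_body : String), Dom_parse_issue_sections issue_body → Spec_parse_issue_sections issue_body (parse_issue_sections issue_body)

-- ===== LEMMAS AND PROOFS =====

-- A's end-of-loop flush (also what A does when it meets the next header)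
def pvFlush (st : PySem.Dict String String × String × List String) : PySem.Dict String String :=
  if st.2.1 ≠ "" then st.1.insert st.2.1 (pvJoinStrip st.2.2) else st.1

lemma pvFoldl_nonheader (ls : List String) (hls : ∀ l ∈ ls, pvIsHeader l = false)
    (d : PySem.Dict String String) (cur : String) (cc : List String) :
    ls.foldl pvStepA (d, cur, cc) = (d, cur, if cur ≠ "" then cc ++ ls else cc) := by
  induction ls generalizing cc with
  | nil => by_cases hc : cur = "" <;> simp [hc]
  | cons x xs ih =>
    have hx : pvIsHeader x = false := hls x (by simp)
    have ihx := ih (fun l hl => hls l (by simp [hl]))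
    by_cases hc : cur = ""
    · subst hc; simp [List.foldl_cons, pvStepA, hx, ihx]
    · simp [List.foldl_cons, pvStepA, hx, hc, ihx]

lemma pvHead_dropWhile (ls : List String) (a : String) (as : List String)
    (h : ls.dropWhile (fun l => !pvIsHeader l) = a :: as) : pvIsHeader a = true := by
  have := List.head_dropWhile_not (fun l => !pvIsHeader l) (l := ls) (by simp [h])
  simp [h] at this
  exact this

lemma pvSegments_eq_nil (ls : List String)
    (h : List.dropWhile (fun l => !pvIsHeader l) ls = []) : pvSegments ls = [] := by
  rw [pvSegments.eq_def]
  split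
  · rfl
  · rename_i hd rest h'; rw [h'] at h; cases h

lemma pvSegments_eq_cons (ls : List String) (hd : String) (rest : List String)
    (h : List.dropWhile (fun l => !pvIsHeader l) ls = hd :: rest) :
    pvSegments ls = (hd, rest.takeWhile (fun l => !pvIsHeader l)) ::
      pvSegments (List.dropWhile (fun l => !pvIsHeader l) rest) := by
  rw [pvSegments.eq_def]
  split
  · rename_i h'; rw [h'] at h; cases h
  · rename_i hd' rest' h'
    rw [h'] at h
    injection h with h1 h2
    subst h1; subst h2
    rfl

lemma pvSegments_dropWhile (ls : List String) :
    pvSegments (ls.dropWhile (fun l => !pvIsHeader l)) = pvSegments ls := by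
  have key : (ls.dropWhile (fun l => !pvIsHeader l)).dropWhile (fun l => !pvIsHeader l)
      = ls.dropWhile (fun l => !pvIsHeader l) := by
    cases h : ls.dropWhile (fun l => !pvIsHeader l) with
    | nil => simp
    | cons a as =>
      have ha : pvIsHeader a = true := pvHead_dropWhile ls a as h
      simp [ha]
  rw [pvSegments, pvSegments, key]

lemma pvFlush_irrel (d : PySem.Dict String String) (cur : String) (cc cc' : List String) :
    pvFlush (d, cur, if cur ≠ "" then cc else cc') = pvFlush (d, cur, cc) := by
  by_cases hc : cur = "" <;> simp [pvFlush, hc]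

lemma pvG (n : Nat) : ∀ (ls : List String), ls.length ≤ n →
    ∀ (d : PySem.Dict String String) (cur : String) (cc : List String),
    pvFlush (ls.foldl pvStepA (d, cur, cc)) =
      (pvSegments ls).foldl pvStepB
        (pvFlush (d, cur, cc ++ ls.takeWhile (fun l => !pvIsHeader l))) := by
  induction n with
  | zero =>
    intro ls hls d cur cc
    have : ls = [] := List.length_eq_zero_iff.mp (Nat.le_zero.mp hls)
    subst this
    simp [pvSegments]
  | succ n ih =>
    intro ls hls d cur cc
    cases h : ls.dropWhile (fun l => !pvIsHeader l) with
    | nil =>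
      have hall : ∀ l ∈ ls, pvIsHeader l = false := by
        have := List.dropWhile_eq_nil_iff.mp h
        intro l hl; simpa using this l hl
      have htake : ls.takeWhile (fun l => !pvIsHeader l) = ls :=
        List.takeWhile_eq_self_iff.mpr (by intro x hx; simp [hall x hx])
      rw [pvSegments_eq_nil ls h, pvFoldl_nonheader ls hall, htake]
      simp only [List.foldl_nil]
      rw [pvFlush_irrel d cur (cc ++ ls) cc]
    | cons hd rest =>
      have hhd : pvIsHeader hd = true := pvHead_dropWhile ls hd rest h
      have hdecomp : ls.takeWhile (fun l => !pvIsHeader l) ++ (hd :: rest) = ls := by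
        rw [← h]; exact List.takeWhile_append_dropWhile
      have htakemem : ∀ l ∈ ls.takeWhile (fun l => !pvIsHeader l), pvIsHeader l = false := by
        intro l hl
        have := List.mem_takeWhile_imp hl
        simpa using this
      have hlen : rest.length ≤ n := by
        have := congrArg List.length hdecomp
        simp at this
        omega
      -- unfold the fold over ls along the decomposition
      conv_lhs => rw [← hdecomp]
      rw [List.foldl_append, pvFoldl_nonheader _ htakemem]
      simp only [List.foldl_cons]
      have hstep : pvStepA (d, cur, if cur ≠ "" then cc ++ ls.takeWhile (fun l => !pvIsHeader l) else cc) hd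
          = (pvFlush (d, cur, cc ++ ls.takeWhile (fun l => !pvIsHeader l)), pvName hd, []) := by
        by_cases hc : cur = "" <;> simp [pvStepA, hhd, pvFlush, hc]
      rw [hstep, ih rest hlen]
      -- right-hand side: unfold pvSegments once
      rw [pvSegments_eq_cons ls hd rest h, List.foldl_cons, pvSegments_dropWhile]
      rfl

theorem parse_issue_sections_spec : Claim_equal_parse_issue_sections := by
  intro issue_body _
  unfold Spec_parse_issue_sections parse_issue_sections parse_issue_sections_alt
  by_cases hb : issue_body = ""
  · subst hb
    rw [if_pos rfl, show pvLines "" = [""] from by decide,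
      pvSegments_eq_nil [""] (by decide)]
    rfl
  · simp only [hb, if_false]
    have := pvG (pvLines issue_body).length (pvLines issue_body) le_rfl PySem.Dict.empty "" []
    have hempty : pvFlush (PySem.Dict.empty, "", ([] : List String) ++ (pvLines issue_body).takeWhile (fun l => !pvIsHeader l)) = PySem.Dict.empty := by
      simp [pvFlush]
    rw [hempty] at this
    exact congrArg PySem.Dict.items this
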